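-- pv_equiv track=rewrite | github.com/simonfqy/SimonfqyGitHub | lintcode/medium/793_intersection_of_arrays.py | intersectionOfArrays
-- ===== SOURCE A (Python) =====
-- def intersectionOfArrays(arrs):
--     count = {}
--     # 记录每个数的出现次数
--     for arr in arrs:
--         for x in arr:
--             if x not in count:
--                 count[x] = 0
--             count[x] += 1
--
--     # 某个数出现次数等于数组个数，代表它在所有数组中都出现过
--     result = 0
--     for x in count.keys():
--         if count[x] == len(arrs):
--             result += 1
--     return result
-- ===== SOURCE B (Python) =====
-- def intersectionOfArrays(arrs):
--     # flatten, sort, then one linear scan over runs of equal values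
--     flat = sorted(x for arr in arrs for x in arr)
--     n = len(arrs)
--     result = 0
--     i = 0
--     while i < len(flat):
--         j = i + 1
--         while j < len(flat) and flat[j] == flat[i]:
--             j += 1
--         if j - i == n:
--             result += 1
--         i = j
--     return result
-- ===== Notes on version B (the rewrite author's own statement) =====
-- stated objective: alternative
-- what changed: Replaces A's dict tally plus key scan with flatten + sort + a single run-length pass over equal adjacent values, counting runs whose length equals len(arrs).
import Mathlib
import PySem

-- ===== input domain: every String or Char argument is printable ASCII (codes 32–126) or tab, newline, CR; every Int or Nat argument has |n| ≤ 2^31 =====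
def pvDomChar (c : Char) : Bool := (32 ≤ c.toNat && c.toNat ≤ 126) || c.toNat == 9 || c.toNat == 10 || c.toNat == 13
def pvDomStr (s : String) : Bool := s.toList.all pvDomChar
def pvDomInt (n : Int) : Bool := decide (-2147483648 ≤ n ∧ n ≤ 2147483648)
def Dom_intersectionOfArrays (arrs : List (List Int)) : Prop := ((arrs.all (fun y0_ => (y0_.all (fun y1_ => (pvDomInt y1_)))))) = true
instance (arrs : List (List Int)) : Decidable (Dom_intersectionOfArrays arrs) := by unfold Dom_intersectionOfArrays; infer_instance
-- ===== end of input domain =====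

-- B replaces A's dict tally with flatten + sort + one run-length scan over equal adjacent values (alternative algorithm, not claimed faster).

-- ===== PORT A =====
def intersectionOfArrays (arrs : List (List Int)) : Int :=
  -- count = {}; for arr in arrs: for x in arr: if x not in count: count[x] = 0; count[x] += 1
  let count : PySem.Dict Int Int :=
    arrs.foldl (fun c arr =>
      arr.foldl (fun c x =>
        let c := if c.contains x then c else c.insert x 0
        c.insert x (c.getD x 0 + 1)) c) PySem.Dict.empty
  -- result = 0; for x in count.keys(): if count[x] == len(arrs): result += 1
  count.keys.foldl (fun r x =>
    if count.getD x 0 = (arrs.length : Int) then r + 1 else r) 0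

-- ===== PORT B =====
-- inner/outer while loops of Source B: consume one run of equal values per step
def pvRuns (l : List Int) (n : Int) : Int :=
  match l with
  | [] => 0
  | x :: rest =>
      (if ((rest.takeWhile (fun y => y == x)).length : Int) + 1 = n then 1 else 0)
        + pvRuns (rest.dropWhile (fun y => y == x)) n
termination_by l.length
decreasing_by
  simp only [List.length_cons]
  exact Nat.lt_succ_of_le (List.length_dropWhile_le _ _)

def intersectionOfArrays_alt (arrs : List (List Int)) : Int :=
  let flat := PySem.List.sorted arrs.flatten (fun x => x) false
  pvRuns flat (arrs.length : Int)

-- ===== PRECONDITION & SPEC =====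
def Spec_intersectionOfArrays (arrs : List (List Int)) (out : Int) : Prop := out = intersectionOfArrays_alt arrs
instance (arrs : List (List Int)) (out : Int) : Decidable (Spec_intersectionOfArrays arrs out) := by unfold Spec_intersectionOfArrays; infer_instance

-- ===== CLAIM (what is proved, stated in full; the proofs are below) =====
def Claim_equal_intersectionOfArrays : Prop := ∀ (arrs : List (List Int)), Dom_intersectionOfArrays arrs → Spec_intersectionOfArrays arrs (intersectionOfArrays arrs)

-- ===== LEMMAS AND PROOFS =====

-- A's loop body ('setdefault 0 then += 1') is the standard counter step
theorem pv_body_eq :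
    (fun (c : PySem.Dict Int Int) (x : Int) =>
        let c := if c.contains x then c else c.insert x 0
        c.insert x (c.getD x 0 + 1))
      = (fun (c : PySem.Dict Int Int) (x : Int) => c.insert x (c.getD x 0 + 1)) := by
  funext c x
  dsimp only
  by_cases h : c.contains x = true
  · simp [h]
  · simp only [Bool.not_eq_true] at h
    rw [if_neg (by simp [h]), PySem.Dict.getD_insert_self,
      PySem.Dict.insert_insert_self, PySem.Dict.getD_of_not_contains c 0 h]

-- A computes: number of distinct values of the flattened input whose total count is len(arrs)
theorem pv_A_eq (arrs : List (List Int)) :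
    intersectionOfArrays arrs
      = ((PySem.Set.ofList arrs.flatten).countP
          (fun k => decide ((arrs.flatten.count k : Int) = (arrs.length : Int))) : Int) := by
  unfold intersectionOfArrays
  rw [pv_body_eq, ← List.foldl_flatten,
    PySem.Dict.foldl_insert_getD_add_one_eq_counter]
  rw [PySem.List.foldl_ite_add_one]
  simp [PySem.Dict.keys_counter, PySem.Dict.getD_counter]

-- run scan over a sorted list = distinct values with the given total count
theorem pv_runs_eq (l : List Int) (h : l.Pairwise (· ≤ ·)) (n : Int) :
    pvRuns l n
      = ((PySem.Set.ofList l).countP (fun k => decide ((l.count k : Int) = n)) : Int) := by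
  revert h
  induction l using pvRuns.induct with
  | case1 =>
    intro _
    simp [pvRuns, PySem.Set.ofList]
  | case2 x rest ih =>
    intro h
    rw [List.pairwise_cons] at h
    obtain ⟨hx, hrest⟩ := h
    set t := rest.takeWhile (fun y => y == x) with ht
    set d := rest.dropWhile (fun y => y == x) with hd
    have hrd : t ++ d = rest := List.takeWhile_append_dropWhile
    have htx : ∀ y ∈ t, y = x := fun y hy => by simpa using List.mem_takeWhile_imp hy
    have hsub : d.Sublist rest := hd ▸ List.dropWhile_sublist _
    have hpd : d.Pairwise (· ≤ ·) := hrest.sublist hsub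
    have hdgt : ∀ y ∈ d, x < y := by
      cases hdd : d with
      | nil => simp
      | cons z d' =>
        intro y hy
        have hzx : (z == x) = false := by
          have hdz : rest.dropWhile (fun y => y == x) = z :: d' := hd.symm.trans hdd
          have := List.head_dropWhile_not (fun y => y == x) (by simp [hdz] : rest.dropWhile (fun y => y == x) ≠ [])
          simpa [hdz] using this
        have hz : x < z := by
          have hle : x ≤ z := hx z (hsub.subset (by rw [hdd]; simp))
          have : z ≠ x := by simpa using hzx
          exact lt_of_le_of_ne hle (Ne.symm this)
        rcases List.mem_cons.mp hy with rfl | hy'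
        · exact hz
        · exact lt_of_lt_of_le hz ((List.pairwise_cons.mp (hdd ▸ hpd)).1 y hy')
    have hxd : x ∉ d := fun hm => lt_irrefl x (hdgt x hm)
    have hcx : (x :: rest).count x = t.length + 1 := by
      have h1 : t.count x = t.length := List.count_eq_length.mpr (fun b hb => (htx b hb).symm)
      have h2 : d.count x = 0 := List.count_eq_zero.mpr hxd
      rw [← hrd]
      simp [List.count_append, h1, h2]
    have hck : ∀ k, k ≠ x → (x :: rest).count k = d.count k := by
      intro k hk
      have h1 : t.count k = 0 := List.count_eq_zero.mpr (fun hm => hk (htx k hm))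
      rw [← hrd]
      simp [List.count_cons, List.count_append, h1]
      exact fun h' => hk h'.symm
    have hperm : (PySem.Set.ofList (x :: rest)).Perm (x :: PySem.Set.ofList d) := by
      refine (List.perm_ext_iff_of_nodup (PySem.Set.nodup_ofList _) ?_).mpr ?_
      · exact List.nodup_cons.mpr ⟨by simpa [PySem.Set.mem_ofList] using hxd, PySem.Set.nodup_ofList d⟩
      · intro y
        simp only [PySem.Set.mem_ofList, List.mem_cons, ← hrd, List.mem_append]
        constructor
        · rintro (rfl | hy | hy)
          · exact Or.inl rfl
          · exact Or.inl (htx y hy)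
          · exact Or.inr hy
        · rintro (rfl | hy)
          · exact Or.inl rfl
          · exact Or.inr (Or.inr hy)
    have hcnt : (PySem.Set.ofList (x :: rest)).countP
          (fun k => decide (((x :: rest).count k : Int) = n))
        = (PySem.Set.ofList d).countP (fun k => decide ((d.count k : Int) = n))
            + if ((t.length : Int) + 1 = n) then 1 else 0 := by
      rw [hperm.countP_eq, List.countP_cons]
      congr 1
      · apply List.countP_congr
        intro k hk
        have hkd : k ∈ d := (PySem.Set.mem_ofList d k).mp hk
        have : k ≠ x := fun hkx => lt_irrefl x (hkx ▸ hdgt k hkd)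
        simp [hck k this]
      · simp only [decide_eq_true_eq, hcx]
        push_cast
        rfl
    rw [pvRuns]
    rw [ih hpd, hcnt]
    push_cast
    ring

-- transfer the countP form along a permutation of the base list
theorem pv_countP_perm (l l' : List Int) (h : l.Perm l') (n : Int) :
    ((PySem.Set.ofList l).countP (fun k => decide ((l.count k : Int) = n)))
      = ((PySem.Set.ofList l').countP (fun k => decide ((l'.count k : Int) = n))) := by
  have hsets : (PySem.Set.ofList l).Perm (PySem.Set.ofList l') := by
    refine (List.perm_ext_iff_of_nodup (PySem.Set.nodup_ofList l) (PySem.Set.nodup_ofList l')).mpr ?_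
    intro x
    simp only [PySem.Set.mem_ofList]
    exact ⟨fun hx => h.mem_iff.mp hx, fun hx => h.mem_iff.mpr hx⟩
  calc (PySem.Set.ofList l).countP (fun k => decide ((l.count k : Int) = n))
      = (PySem.Set.ofList l).countP (fun k => decide ((l'.count k : Int) = n)) := by
        apply List.countP_congr; intro k _; simp [h.count_eq]
    _ = (PySem.Set.ofList l').countP (fun k => decide ((l'.count k : Int) = n)) :=
        hsets.countP_eq _

-- ===== VERDICT (by name: the statement is the Claim_ definition above) =====
theorem intersectionOfArrays_spec : Claim_equal_intersectionOfArrays := by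
  intro arrs _
  unfold Spec_intersectionOfArrays intersectionOfArrays_alt
  rw [pv_A_eq, pv_runs_eq _ (by simpa using PySem.List.sorted_pairwise arrs.flatten (fun x => x)),
    pv_countP_perm _ _ (PySem.List.sorted_perm arrs.flatten (fun x => x) false)]
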